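-- pv_equiv track=rewrite | github.com/pukeeee/zlpProjects | TaskHabitRPGBot/app/main.py | daysToBinary
-- ===== SOURCE A (Python) =====
-- def daysToBinary(selected_days):
--     days_position = {
--         'mon': 0,
--         'tue': 1,
--         'wed': 2,
--         'thu': 3,
--         'fri': 4,
--         'sat': 5,
--         'sun': 6
--     }
--
--     binary_list = ['0'] * 7
--     for day in selected_days:
--         if day in days_position:
--             binary_list[days_position[day]] = '1'
--     return ''.join(binary_list)
-- ===== SOURCE B (Python) =====
-- def daysToBinary(selected_days):
--     present = set(selected_days)
--     order = ['mon', 'tue', 'wed', 'thu', 'fri', 'sat', 'sun']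
--     return ''.join('1' if d in present else '0' for d in order)
-- ===== Notes on version B (the rewrite author's own statement) =====
-- stated objective: idiomatic
-- what changed: Instead of scattering writes into an index-keyed mutable list while iterating the input, B builds a membership set of the input once and then walks the seven output positions in order, emitting '1'/'0' by membership.
import Mathlib
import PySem

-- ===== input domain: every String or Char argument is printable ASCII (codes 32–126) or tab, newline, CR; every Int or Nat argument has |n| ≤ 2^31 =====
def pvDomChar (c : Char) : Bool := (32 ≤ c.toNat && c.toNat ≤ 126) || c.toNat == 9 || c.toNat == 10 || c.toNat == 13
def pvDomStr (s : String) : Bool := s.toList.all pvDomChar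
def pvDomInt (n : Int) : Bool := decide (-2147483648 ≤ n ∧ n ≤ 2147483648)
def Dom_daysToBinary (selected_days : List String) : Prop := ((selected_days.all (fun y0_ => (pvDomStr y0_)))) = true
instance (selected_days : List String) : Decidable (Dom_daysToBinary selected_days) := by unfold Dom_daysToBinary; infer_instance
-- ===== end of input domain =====

-- B walks the seven output positions in order emitting '1'/'0' by set membership,
-- instead of A's scattering of writes into an index-keyed list while iterating the input.

-- ===== PORT A =====
-- A's dict literal days_position (insertion order of the literal)
def daysPosition : PySem.Dict String Int :=
  ((((((PySem.Dict.empty.insert "mon" 0).insert "tue" 1).insert "wed" 2).insert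
        "thu" 3).insert "fri" 4).insert "sat" 5).insert "sun" 6

-- the body of A's for-loop: if day in days_position: binary_list[days_position[day]] = '1'
-- (the index is a literal 0..6, hence nonnegative and in range: .toNat is exact here)
def stepA (bl : List String) (day : String) : List String :=
  if daysPosition.contains day then bl.set (daysPosition.getD day 0).toNat "1" else bl

def daysToBinary (selected_days : List String) : String :=
  let binary_list : List String := List.replicate 7 "0"
  let binary_list := selected_days.foldl stepA binary_list
  PySem.Str.join "" binary_list

-- ===== PORT B =====
-- B's fixed ordered list of weekday names
def weekOrder : List String := ["mon", "tue", "wed", "thu", "fri", "sat", "sun"]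

def daysToBinary_alt (selected_days : List String) : String :=
  let present : PySem.Set String := PySem.Set.ofList selected_days
  PySem.Str.join "" (weekOrder.map (fun d => if PySem.Set.contains present d then "1" else "0"))

-- ===== PRECONDITION & SPEC =====
def Spec_daysToBinary (selected_days : List String) (out : String) : Prop := out = daysToBinary_alt selected_days
instance (selected_days : List String) (out : String) : Decidable (Spec_daysToBinary selected_days out) := by unfold Spec_daysToBinary; infer_instance

-- ===== CLAIM (what is proved, stated in full; the proofs are below) =====
def Claim_equal_daysToBinary : Prop := ∀ (selected_days : List String), Dom_daysToBinary selected_days → Spec_daysToBinary selected_days (daysToBinary selected_days)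

-- ===== LEMMAS AND PROOFS =====

-- One loop step of A, acting on a 7-list marked by an arbitrary predicate p,
-- yields the 7-list marked by p extended with the processed day.
lemma stepA_mark (p : String → Bool) (x : String) :
    stepA (weekOrder.map (fun d => if p d then "1" else "0")) x
      = weekOrder.map (fun d => if (p d || (d == x)) then "1" else "0") := by
  by_cases h1 : x = "mon"
  · subst h1; simp [stepA, daysPosition, weekOrder, PySem.Dict.contains_insert, PySem.Dict.getD_insert_self, PySem.Dict.getD_insert_of_ne]
  by_cases h2 : x = "tue"
  · subst h2; simp [stepA, daysPosition, weekOrder, PySem.Dict.contains_insert, PySem.Dict.getD_insert_self, PySem.Dict.getD_insert_of_ne]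
  by_cases h3 : x = "wed"
  · subst h3; simp [stepA, daysPosition, weekOrder, PySem.Dict.contains_insert, PySem.Dict.getD_insert_self, PySem.Dict.getD_insert_of_ne]
  by_cases h4 : x = "thu"
  · subst h4; simp [stepA, daysPosition, weekOrder, PySem.Dict.contains_insert, PySem.Dict.getD_insert_self, PySem.Dict.getD_insert_of_ne]
  by_cases h5 : x = "fri"
  · subst h5; simp [stepA, daysPosition, weekOrder, PySem.Dict.contains_insert, PySem.Dict.getD_insert_self, PySem.Dict.getD_insert_of_ne]
  by_cases h6 : x = "sat"
  · subst h6; simp [stepA, daysPosition, weekOrder, PySem.Dict.contains_insert, PySem.Dict.getD_insert_self, PySem.Dict.getD_insert_of_ne]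
  by_cases h7 : x = "sun"
  · subst h7; simp [stepA, daysPosition, weekOrder, PySem.Dict.contains_insert, PySem.Dict.getD_insert_self, PySem.Dict.getD_insert_of_ne]
  have hc : daysPosition.contains x = false := by
    simp [daysPosition, PySem.Dict.contains, PySem.Dict.insert, PySem.Dict.empty]
    exact ⟨Ne.symm h1, Ne.symm h2, Ne.symm h3, Ne.symm h4, Ne.symm h5, Ne.symm h6, Ne.symm h7⟩
  simp [stepA, hc, weekOrder, Ne.symm h1, Ne.symm h2, Ne.symm h3, Ne.symm h4, Ne.symm h5, Ne.symm h6, Ne.symm h7]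

-- A's whole loop, started from the p-marked 7-list, marks by p-or-membership.
lemma foldl_stepA_mark (l : List String) (p : String → Bool) :
    l.foldl stepA (weekOrder.map (fun d => if p d then "1" else "0"))
      = weekOrder.map (fun d => if (p d || l.contains d) then "1" else "0") := by
  induction l generalizing p with
  | nil => simp
  | cons x l ih =>
    rw [List.foldl_cons, stepA_mark, ih (fun d => p d || (d == x))]
    apply List.map_congr_left
    intro d _
    simp [Bool.or_assoc]

-- ===== VERDICT (by name: the statement is the Claim_ definition above) =====
theorem daysToBinary_spec : Claim_equal_daysToBinary := by
  intro selected_days _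
  show PySem.Str.join "" (selected_days.foldl stepA (List.replicate 7 "0"))
      = PySem.Str.join "" (weekOrder.map
          (fun d => if PySem.Set.contains (PySem.Set.ofList selected_days) d then "1" else "0"))
  have h0 : (List.replicate 7 "0")
      = weekOrder.map (fun d => if (fun _ : String => false) d then "1" else "0") := rfl
  rw [h0, foldl_stepA_mark]
  simp
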